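-- pv_equiv track=rewrite | github.com/20ksimpleman/AI_inspector_ | model/build_dataset.py | is_example_context
-- ===== SOURCE A (Python) =====
-- def is_example_context(text: str) -> bool:
--     text_lower = text.lower()
--     markers = [
--         'example.org', 'example.com', 'test@', 'sample', 'dummy',
--         'documentation', 'tutorial', 'const ', 'let ', 'var ',
--         'def ', 'function ', 'regex', 'format:'
--     ]
--     return any(marker in text_lower for marker in markers)
-- ===== SOURCE B (Python) =====
-- MARKERS = ('example.org', 'example.com', 'test@', 'sample',
--            'dummy', 'documentation', 'tutorial', 'const ',
--            'let ', 'var ', 'def ', 'function ', 'regex', 'format:')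
--
-- def is_example_context(text: str) -> bool:
--     t = text.lower()
--     # single left-to-right scan: at each position, does any marker start here?
--     for i in range(len(t) + 1):
--         for m in MARKERS:
--             if t.startswith(m, i):
--                 return True
--     return False
-- ===== Notes on version B (the rewrite author's own statement) =====
-- stated objective: alternative
-- what changed: Replaces the per-marker substring search (any(marker in text) scans the text once per marker) by a single left-to-right scan over positions that checks at each position whether any marker starts there.
import Mathlib
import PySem

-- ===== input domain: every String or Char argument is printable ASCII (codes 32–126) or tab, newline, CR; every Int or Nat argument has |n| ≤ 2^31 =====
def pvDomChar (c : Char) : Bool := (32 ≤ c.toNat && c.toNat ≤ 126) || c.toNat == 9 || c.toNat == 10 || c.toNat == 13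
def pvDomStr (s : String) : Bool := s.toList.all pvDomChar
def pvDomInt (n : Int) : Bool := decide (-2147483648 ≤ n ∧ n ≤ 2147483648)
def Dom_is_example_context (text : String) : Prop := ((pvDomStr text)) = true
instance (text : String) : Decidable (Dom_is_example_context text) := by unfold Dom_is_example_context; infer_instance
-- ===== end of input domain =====

-- B replaces A's per-marker substring search by a single left-to-right scan over
-- positions that checks at each position whether any marker starts there (alternative).

-- ===== PORT A =====
def is_example_context (text : String) : Bool :=
  let text_lower := PySem.Str.lower text
  let markers : List String :=
    ["example.org", "example.com", "test@", "sample", "dummy",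
     "documentation", "tutorial", "const ", "let ", "var ",
     "def ", "function ", "regex", "format:"]
  markers.any (fun marker => PySem.Str.isIn marker text_lower)

-- ===== PORT B =====
-- the position loop of Source B: at each suffix (position i), check every marker in order
def altScan (markers : List String) (cs : List Char) : Bool :=
  if markers.any (fun m => PySem.Chars.startswith cs m.toList) then true
  else
    match cs with
    | [] => false
    | _ :: rest => altScan markers rest

def is_example_context_alt (text : String) : Bool :=
  let t := PySem.Str.lower text
  let markers : List String :=
    ["example.org", "example.com", "test@", "sample", "dummy",
     "documentation", "tutorial", "const ", "let ", "var ",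
     "def ", "function ", "regex", "format:"]
  altScan markers t.toList

-- ===== PRECONDITION & SPEC =====
def Spec_is_example_context (text : String) (out : Bool) : Prop := out = is_example_context_alt text
instance (text : String) (out : Bool) : Decidable (Spec_is_example_context text out) := by unfold Spec_is_example_context; infer_instance

-- ===== CLAIM (what is proved, stated in full; the proofs are below) =====
def Claim_equal_is_example_context : Prop := ∀ (text : String), Dom_is_example_context text → Spec_is_example_context text (is_example_context text)

-- ===== LEMMAS AND PROOFS =====

theorem any_or_distrib {α : Type} (l : List α) (f g : α → Bool) :
    (l.any fun x => f x || g x) = (l.any f || l.any g) := by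
  induction l with
  | nil => simp
  | cons a l ih => simp [List.any_cons, ih, Bool.or_assoc, Bool.or_left_comm]

theorem isIn_cons_eq (sub : List Char) (cs : List Char) :
    PySem.Chars.isIn sub cs
      = (PySem.Chars.startswith cs sub ||
          match cs with | [] => false | _ :: rest => PySem.Chars.isIn sub rest) := by
  cases cs with
  | nil =>
    apply Bool.eq_iff_iff.mpr
    simp [PySem.Chars.isIn_iff_infix, PySem.Chars.startswith_iff]
  | cons c rest =>
    apply Bool.eq_iff_iff.mpr
    simp [PySem.Chars.isIn_iff_infix, PySem.Chars.startswith_iff, List.infix_cons_iff]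

theorem altScan_eq (markers : List String) (cs : List Char) :
    altScan markers cs = markers.any (fun m => PySem.Chars.isIn m.toList cs) := by
  induction cs with
  | nil =>
    rw [altScan]
    have h : (fun m : String => PySem.Chars.isIn m.toList ([] : List Char))
        = fun m : String => PySem.Chars.startswith [] m.toList := by
      funext m; rw [isIn_cons_eq]; simp
    rw [h]
    split_ifs with hc <;> simp [hc]
  | cons c rest ih =>
    rw [altScan]
    have h : (fun m : String => PySem.Chars.isIn m.toList (c :: rest))
        = fun m : String =>
            PySem.Chars.startswith (c :: rest) m.toList || PySem.Chars.isIn m.toList rest := by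
      funext m; rw [isIn_cons_eq]
    rw [h, any_or_distrib, ← ih]
    split_ifs with hc <;> simp [hc]

-- ===== VERDICT (by name: the statement is the Claim_ definition above) =====
theorem is_example_context_spec : Claim_equal_is_example_context := by
  intro text _
  unfold Spec_is_example_context is_example_context is_example_context_alt
  rw [altScan_eq]
  simp [PySem.Str.isIn_eq]
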